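-- pv_equiv track=rewrite | github.com/npedder/moos-ivp-harmony | py/AlgorithmDevelopment/cellDecomposition.py | _dfs_combine_nodes
-- ===== SOURCE A (Python) =====
-- def _dfs_combine_nodes(graph, node, visited, nodes_to_combine, highest_node, lowest_node):
--     if node not in visited:
--         visited.add(node)
--         if node[0] == nodes_to_combine[0][0]: # If same X value as start node
--             if node != nodes_to_combine[0]:
--                 nodes_to_combine.append(node) # Don't append start node again
--             if node[1] > highest_node[1]:
--                 highest_node = node
--             if node[1] < lowest_node[1]:
--                 lowest_node = node
--             for neighbor in list(graph[node]):
--                 highest_node, lowest_node = _dfs_combine_nodes(graph, neighbor, visited, nodes_to_combine, highest_node, lowest_node)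
--
--     return highest_node, lowest_node
-- ===== SOURCE B (Python) =====
-- def _dfs_combine_nodes(graph, node, visited, nodes_to_combine, highest_node, lowest_node):
--     # Iterative pre-order DFS with an explicit stack; same mutations of
--     # `visited` and `nodes_to_combine` as the recursive original.
--     start = nodes_to_combine[0]
--     target_x = start[0]
--     stack = [node]
--     while stack:
--         n = stack.pop()
--         if n in visited:
--             continue
--         visited.add(n)
--         if n[0] != target_x:
--             continue
--         if n != start:
--             nodes_to_combine.append(n)
--         if n[1] > highest_node[1]:
--             highest_node = n
--         if n[1] < lowest_node[1]:
--             lowest_node = n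
--         stack.extend(reversed(graph[n]))
--     return highest_node, lowest_node
-- ===== Notes on version B (the rewrite author's own statement) =====
-- stated objective: alternative
-- what changed: Replaces the recursion (extremes threaded through nested return values, neighbor loop re-entering the function) by an iterative pre-order DFS over an explicit stack initialised with the start node, keeping highest/lowest in plain locals and pushing neighbors reversed so the first-visit order, the mutations of visited/nodes_to_combine and the returned extremes are identical.
-- outside the precondition, e.g. on _dfs_combine_nodes({}, (0, 0), {(0, 0)}, [], (0, 0), (0, 0)): A returns ((0, 0), (0, 0)), B raises IndexError
import Mathlib
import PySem

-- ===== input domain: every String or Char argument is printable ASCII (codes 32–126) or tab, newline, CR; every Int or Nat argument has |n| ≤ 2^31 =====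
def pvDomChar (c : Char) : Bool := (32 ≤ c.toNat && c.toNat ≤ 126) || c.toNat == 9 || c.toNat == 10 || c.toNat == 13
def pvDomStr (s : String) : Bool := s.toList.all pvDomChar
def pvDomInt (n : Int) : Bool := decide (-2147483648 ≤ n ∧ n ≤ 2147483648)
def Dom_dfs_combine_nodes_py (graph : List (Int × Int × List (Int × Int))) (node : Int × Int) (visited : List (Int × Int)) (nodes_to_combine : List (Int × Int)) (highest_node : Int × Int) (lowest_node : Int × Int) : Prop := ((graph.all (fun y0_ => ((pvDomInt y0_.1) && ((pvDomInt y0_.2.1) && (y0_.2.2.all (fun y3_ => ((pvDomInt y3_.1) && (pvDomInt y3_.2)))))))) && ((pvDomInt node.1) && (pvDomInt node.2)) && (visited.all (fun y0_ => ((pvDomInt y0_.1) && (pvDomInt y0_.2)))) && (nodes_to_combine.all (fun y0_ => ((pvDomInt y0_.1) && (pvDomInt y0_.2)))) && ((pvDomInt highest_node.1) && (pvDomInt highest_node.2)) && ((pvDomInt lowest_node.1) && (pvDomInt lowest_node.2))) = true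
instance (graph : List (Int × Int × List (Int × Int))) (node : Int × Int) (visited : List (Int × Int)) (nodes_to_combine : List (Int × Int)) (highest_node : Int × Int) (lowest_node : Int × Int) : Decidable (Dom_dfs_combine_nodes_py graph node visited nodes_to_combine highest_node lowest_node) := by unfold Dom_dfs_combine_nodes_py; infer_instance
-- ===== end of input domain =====

-- B replaces A's recursion by an iterative explicit-stack pre-order DFS (extremes kept in locals,
-- neighbors pushed reversed), same return value and same mutations of visited/nodes_to_combine.

-- graph[n] for the dict keyed by (x, y) pairs (the assoc list stores flattened triples)
def pvLookupAdj (graph : List (Int × Int × List (Int × Int))) (n : Int × Int) : Option (List (Int × Int)) :=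
  (graph.find? (fun e => e.1 == n.1 && e.2.1 == n.2)).map (fun e => e.2.2)

-- ===== PORT A =====
-- Literal port of the recursive Python A; `fuel` only guards totality (one unit per nested call;
-- recursion depth is bounded by the number of graph keys, so graph.length + 1 never runs out).
mutual
def dfsACore (graph : List (Int × Int × List (Int × Int))) (fuel : Nat) (node : Int × Int)
    (visited nodes_to_combine : List (Int × Int)) (highest_node lowest_node : Int × Int) :
    ((Int × Int) × (Int × Int)) × List (Int × Int) × List (Int × Int) :=
  match fuel with
  | 0 => ((highest_node, lowest_node), visited, nodes_to_combine)   -- fuel guard only, never reached from the entry point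
  | fuel + 1 =>
    if visited.contains node then ((highest_node, lowest_node), visited, nodes_to_combine)
    else
      let visited' := PySem.Set.add visited node
      match PySem.List.pyGet? nodes_to_combine 0 with
      | none => ((highest_node, lowest_node), visited', nodes_to_combine)   -- Python raises IndexError here; outside Pre_
      | some start =>
        if node.1 = start.1 then
          let ntc' := if node ≠ start then nodes_to_combine ++ [node] else nodes_to_combine
          let h' := if node.2 > highest_node.2 then node else highest_node
          let l' := if node.2 < lowest_node.2 then node else lowest_node
          match pvLookupAdj graph node with
          | none => ((h', l'), visited', ntc')   -- Python raises KeyError here; outside Pre_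
          | some adj => dfsAList graph fuel adj visited' ntc' h' l'
        else ((highest_node, lowest_node), visited', nodes_to_combine)
  termination_by (fuel, 0)

-- the `for neighbor in list(graph[node])` loop, threading (highest, lowest, visited, ntc)
def dfsAList (graph : List (Int × Int × List (Int × Int))) (fuel : Nat) (adj : List (Int × Int))
    (visited nodes_to_combine : List (Int × Int)) (highest_node lowest_node : Int × Int) :
    ((Int × Int) × (Int × Int)) × List (Int × Int) × List (Int × Int) :=
  match adj with
  | [] => ((highest_node, lowest_node), visited, nodes_to_combine)
  | n :: rest =>
    let r := dfsACore graph fuel n visited nodes_to_combine highest_node lowest_node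
    dfsAList graph fuel rest r.2.1 r.2.2 r.1.1 r.1.2
  termination_by (fuel, adj.length + 1)
end

def dfs_combine_nodes_py (graph : List (Int × Int × List (Int × Int))) (node : Int × Int) (visited : List (Int × Int)) (nodes_to_combine : List (Int × Int)) (highest_node : Int × Int) (lowest_node : Int × Int) : (Int × Int) × (Int × Int) :=
  (dfsACore graph (graph.length + 1) node visited nodes_to_combine highest_node lowest_node).1

-- ===== PORT B =====
-- number of graph keys not yet visited: the termination measure of B's stack loop
def pvCC (graph : List (Int × Int × List (Int × Int))) (visited : List (Int × Int)) : Nat :=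
  graph.countP (fun e => !(visited.contains (e.1, e.2.1)))

theorem pvContains_add (v : List (Int × Int)) (n k : Int × Int) :
    (PySem.Set.add v n).contains k = (v.contains k || k == n) := by
  by_cases hk : k = n <;> by_cases hv : n ∈ v <;> simp_all [PySem.Set.add]

theorem pvCountP_le_of_imp {a : Type} (l : List a) (p q : a → Bool)
    (h : ∀ x, p x = true → q x = true) : l.countP p ≤ l.countP q := by
  induction l with
  | nil => simp
  | cons x xs ih =>
    simp only [List.countP_cons]
    by_cases hp : p x = true
    · simp [hp, h x hp]; omega
    · simp only [Bool.not_eq_true] at hp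
      simp [hp]
      split <;> omega

theorem pvCountP_lt {a : Type} (l : List a) (p q : a → Bool)
    (h : ∀ x, p x = true → q x = true) (w : a) (hw : w ∈ l)
    (hp : p w = false) (hq : q w = true) : l.countP p < l.countP q := by
  induction l with
  | nil => simp at hw
  | cons x xs ih =>
    simp only [List.countP_cons]
    rcases List.mem_cons.mp hw with rfl | hw'
    · have := pvCountP_le_of_imp xs p q h
      simp [hp, hq]; omega
    · have := ih hw'
      by_cases hx : p x = true
      · simp [hx, h x hx]; omega
      · simp only [Bool.not_eq_true] at hx
        simp [hx]
        split <;> omega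

theorem pvCC_add_le (graph : List (Int × Int × List (Int × Int))) (v : List (Int × Int)) (n : Int × Int) :
    pvCC graph (PySem.Set.add v n) ≤ pvCC graph v := by
  apply pvCountP_le_of_imp
  intro e
  simp [pvContains_add]
  tauto

theorem pvMem_keys_of_lookup (graph : List (Int × Int × List (Int × Int))) (n : Int × Int)
    (adj : List (Int × Int)) (hfind : pvLookupAdj graph n = some adj) :
    ∃ e ∈ graph, (e.1, e.2.1) = n := by
  unfold pvLookupAdj at hfind
  rcases Option.map_eq_some_iff.mp hfind with ⟨e, he, _⟩
  refine ⟨e, List.mem_of_find?_eq_some he, ?_⟩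
  have := List.find?_some he
  cases n
  simp_all

theorem pvCC_add_lt (graph : List (Int × Int × List (Int × Int))) (v : List (Int × Int)) (n : Int × Int)
    (adj : List (Int × Int)) (hfind : pvLookupAdj graph n = some adj) (hc : v.contains n = false) :
    pvCC graph (PySem.Set.add v n) < pvCC graph v := by
  rcases pvMem_keys_of_lookup graph n adj hfind with ⟨e, he, hkey⟩
  refine pvCountP_lt _ _ _ ?_ e he ?_ ?_
  · intro x
    simp [pvContains_add]
    tauto
  · rw [hkey]
    simp [pvContains_add]
  · rw [hkey]
    simpa using hc

-- Literal port of B's while-loop (stack top at the list head; `stack.extend(reversed(graph[n]))`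
-- followed by `pop()` from the end is prepending `adj` in order).
def dfsBLoop (graph : List (Int × Int × List (Int × Int))) (start : Int × Int)
    (stack visited ntc : List (Int × Int)) (h l : Int × Int) : (Int × Int) × (Int × Int) :=
  match stack with
  | [] => (h, l)
  | n :: stack' =>
    if hv : visited.contains n then dfsBLoop graph start stack' visited ntc h l
    else
      let visited' := PySem.Set.add visited n
      if n.1 ≠ start.1 then dfsBLoop graph start stack' visited' ntc h l
      else
        let ntc' := if n ≠ start then ntc ++ [n] else ntc
        let h' := if n.2 > h.2 then n else h
        let l' := if n.2 < l.2 then n else l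
        match hadj : pvLookupAdj graph n with
        | none => dfsBLoop graph start stack' visited' ntc' h' l'   -- Python raises KeyError here; outside Pre_
        | some adj => dfsBLoop graph start (adj ++ stack') visited' ntc' h' l'
  termination_by (pvCC graph visited, stack.length)
  decreasing_by
  · exact Prod.Lex.right _ (by simp)
  · rcases Nat.lt_or_eq_of_le (pvCC_add_le graph visited n) with hlt | heq
    · exact Prod.Lex.left _ _ hlt
    · rw [heq]; exact Prod.Lex.right _ (by simp)
  · rcases Nat.lt_or_eq_of_le (pvCC_add_le graph visited n) with hlt | heq
    · exact Prod.Lex.left _ _ hlt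
    · rw [heq]; exact Prod.Lex.right _ (by simp)
  · exact Prod.Lex.left _ _ (pvCC_add_lt graph visited n adj hadj (by simpa using hv))

def dfs_combine_nodes_py_alt (graph : List (Int × Int × List (Int × Int))) (node : Int × Int) (visited : List (Int × Int)) (nodes_to_combine : List (Int × Int)) (highest_node : Int × Int) (lowest_node : Int × Int) : (Int × Int) × (Int × Int) :=
  match PySem.List.pyGet? nodes_to_combine 0 with
  | none => (highest_node, lowest_node)   -- Python raises IndexError here; outside Pre_
  | some start => dfsBLoop graph start [node] visited nodes_to_combine highest_node lowest_node

-- ===== PRECONDITION & SPEC =====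
def pvKeys (graph : List (Int × Int × List (Int × Int))) : List (Int × Int) :=
  graph.map (fun e => (e.1, e.2.1))

-- Pre_ excludes: (a) empty nodes_to_combine (A raises IndexError when node is unvisited; B always)
-- and (b) graphs where the start node, or a neighbor of a same-X entry, has the start X yet is
-- neither a key nor already visited (Python raises KeyError if such a node is reached; Pre_
-- over-approximates reachability, so it also drops some inputs where the dangling node is never
-- reached and A returns normally — see cites); and (c) duplicate keys in the assoc-list rendering
-- of the dict, which no Python dict can represent faithfully.
def Pre_dfs_combine_nodes_py (graph : List (Int × Int × List (Int × Int))) (node : Int × Int) (visited : List (Int × Int)) (nodes_to_combine : List (Int × Int)) (highest_node : Int × Int) (lowest_node : Int × Int) : Prop :=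
  nodes_to_combine ≠ [] ∧
  (pvKeys graph).Nodup ∧
  (node.1 ≠ nodes_to_combine.headI.1 ∨ node ∈ pvKeys graph ∨ node ∈ visited) ∧
  (∀ e ∈ graph, e.1 = nodes_to_combine.headI.1 →
    ∀ m ∈ e.2.2, m.1 ≠ nodes_to_combine.headI.1 ∨ m ∈ pvKeys graph ∨ m ∈ visited)
instance (graph : List (Int × Int × List (Int × Int))) (node : Int × Int) (visited : List (Int × Int)) (nodes_to_combine : List (Int × Int)) (highest_node : Int × Int) (lowest_node : Int × Int) : Decidable (Pre_dfs_combine_nodes_py graph node visited nodes_to_combine highest_node lowest_node) := by unfold Pre_dfs_combine_nodes_py; infer_instance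

def pvWitness_dfs_combine_nodes_py : (List (Int × Int × List (Int × Int))) × (Int × Int) × (List (Int × Int)) × (List (Int × Int)) × (Int × Int) × (Int × Int) :=
  ([(0, 0, [(0, 1)]), (0, 1, [])], (0, 0), [], [(0, 0)], (0, 0), (0, 0))

def Spec_dfs_combine_nodes_py (graph : List (Int × Int × List (Int × Int))) (node : Int × Int) (visited : List (Int × Int)) (nodes_to_combine : List (Int × Int)) (highest_node : Int × Int) (lowest_node : Int × Int) (out : (Int × Int) × (Int × Int)) : Prop := out = dfs_combine_nodes_py_alt graph node visited nodes_to_combine highest_node lowest_node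
instance (graph : List (Int × Int × List (Int × Int))) (node : Int × Int) (visited : List (Int × Int)) (nodes_to_combine : List (Int × Int)) (highest_node : Int × Int) (lowest_node : Int × Int) (out : (Int × Int) × (Int × Int)) : Decidable (Spec_dfs_combine_nodes_py graph node visited nodes_to_combine highest_node lowest_node out) := by unfold Spec_dfs_combine_nodes_py; infer_instance

-- ===== CLAIM (what is proved, stated in full; the proofs are below) =====
def Claim_equal_dfs_combine_nodes_py : Prop := ∀ (graph : List (Int × Int × List (Int × Int))) (node : Int × Int) (visited : List (Int × Int)) (nodes_to_combine : List (Int × Int)) (highest_node : Int × Int) (lowest_node : Int × Int), Dom_dfs_combine_nodes_py graph node visited nodes_to_combine highest_node lowest_node → Pre_dfs_combine_nodes_py graph node visited nodes_to_combine highest_node lowest_node → Spec_dfs_combine_nodes_py graph node visited nodes_to_combine highest_node lowest_node (dfs_combine_nodes_py graph node visited nodes_to_combine highest_node lowest_node)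

-- ===== LEMMAS AND PROOFS =====

theorem witness_ok : Dom_dfs_combine_nodes_py (pvWitness_dfs_combine_nodes_py.1) (pvWitness_dfs_combine_nodes_py.2.1) (pvWitness_dfs_combine_nodes_py.2.2.1) (pvWitness_dfs_combine_nodes_py.2.2.2.1) (pvWitness_dfs_combine_nodes_py.2.2.2.2.1) (pvWitness_dfs_combine_nodes_py.2.2.2.2.2) ∧ Pre_dfs_combine_nodes_py (pvWitness_dfs_combine_nodes_py.1) (pvWitness_dfs_combine_nodes_py.2.1) (pvWitness_dfs_combine_nodes_py.2.2.1) (pvWitness_dfs_combine_nodes_py.2.2.2.1) (pvWitness_dfs_combine_nodes_py.2.2.2.2.1) (pvWitness_dfs_combine_nodes_py.2.2.2.2.2) := by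
  constructor
  · decide
  · decide

-- the head of nodes_to_combine is preserved by A's recursion (it only appends)
theorem listA_ntc_head (graph : List (Int × Int × List (Int × Int))) (fuel : Nat)
    (hc : ∀ n v ntc h l, ((dfsACore graph fuel n v ntc h l).2.2).head? = ntc.head?) :
    ∀ adj v ntc h l, ((dfsAList graph fuel adj v ntc h l).2.2).head? = ntc.head? := by
  intro adj
  induction adj with
  | nil => intro v ntc h l; simp [dfsAList]
  | cons n rest ih =>
    intro v ntc h l
    rw [dfsAList]
    rw [ih, hc]

theorem coreA_ntc_head : ∀ (fuel : Nat) (graph : List (Int × Int × List (Int × Int))) (n : Int × Int)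
    (v ntc : List (Int × Int)) (h l : Int × Int),
    ((dfsACore graph fuel n v ntc h l).2.2).head? = ntc.head? := by
  intro fuel
  induction fuel with
  | zero => intro graph n v ntc h l; rw [dfsACore]
  | succ f ih =>
    intro graph n v ntc h l
    rw [dfsACore]
    split
    · rfl
    split
    · rfl
    rename_i start hget
    have hne : ntc ≠ [] := by
      intro hnil; rw [hnil] at hget; simp [PySem.List.pyGet?] at hget
    have hhead : (if n ≠ start then ntc ++ [n] else ntc).head? = ntc.head? := by
      split
      · cases ntc with
        | nil => exact absurd rfl hne
        | cons a b => simp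
      · rfl
    split
    · rcases hadj : pvLookupAdj graph n with _ | adj
      · simp only [hadj]
        simpa using hhead
      · simp only [hadj]
        rw [listA_ntc_head graph f (fun n v ntc h l => ih graph n v ntc h l)]
        simpa using hhead
    · rfl

theorem listA_cc (graph : List (Int × Int × List (Int × Int))) (fuel : Nat)
    (hc : ∀ n v ntc h l, pvCC graph ((dfsACore graph fuel n v ntc h l).2.1) ≤ pvCC graph v) :
    ∀ adj v ntc h l, pvCC graph ((dfsAList graph fuel adj v ntc h l).2.1) ≤ pvCC graph v := by
  intro adj
  induction adj with
  | nil => intro v ntc h l; simp [dfsAList]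
  | cons n rest ih =>
    intro v ntc h l
    rw [dfsAList]
    exact le_trans (ih _ _ _ _) (hc _ _ _ _ _)

theorem coreA_cc : ∀ (fuel : Nat) (graph : List (Int × Int × List (Int × Int))) (n : Int × Int)
    (v ntc : List (Int × Int)) (h l : Int × Int),
    pvCC graph ((dfsACore graph fuel n v ntc h l).2.1) ≤ pvCC graph v := by
  intro fuel
  induction fuel with
  | zero => intro graph n v ntc h l; rw [dfsACore]
  | succ f ih =>
    intro graph n v ntc h l
    rw [dfsACore]
    split
    · exact le_refl _
    split
    · exact pvCC_add_le _ _ _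
    split
    · rcases hadj : pvLookupAdj graph n with _ | adj
      · simp only [hadj]
        exact pvCC_add_le _ _ _
      · simp only [hadj]
        exact le_trans (listA_cc graph f (fun n v ntc h l => ih graph n v ntc h l) _ _ _ _ _)
          (pvCC_add_le _ _ _)
    · exact pvCC_add_le _ _ _

-- the simulation: B's stack loop on (ns ++ rest) first performs exactly A's recursion over ns
theorem keyB : ∀ (fuel : Nat) (graph : List (Int × Int × List (Int × Int))) (start : Int × Int)
    (ns rest v ntc : List (Int × Int)) (h l : Int × Int),
    pvCC graph v < fuel → ntc.head? = some start →
    dfsBLoop graph start (ns ++ rest) v ntc h l =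
      dfsBLoop graph start rest (dfsAList graph fuel ns v ntc h l).2.1
        (dfsAList graph fuel ns v ntc h l).2.2
        (dfsAList graph fuel ns v ntc h l).1.1 (dfsAList graph fuel ns v ntc h l).1.2 := by
  intro fuel
  induction fuel with
  | zero => intro graph start ns rest v ntc h l hcc; omega
  | succ f ihf =>
    intro graph start ns
    induction ns with
    | nil =>
      intro rest v ntc h l hcc hh
      simp [dfsAList]
    | cons n ns' ih =>
      intro rest v ntc h l hcc hh
      have hne : ntc ≠ [] := by intro hnil; rw [hnil] at hh; simp at hh
      have hget : PySem.List.pyGet? ntc 0 = some start := by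
        cases ntc with
        | nil => exact absurd rfl hne
        | cons a b => simp_all
      by_cases hv : v.contains n = true
      · have hmem : n ∈ v := by simpa using hv
        have hB : dfsBLoop graph start ((n :: ns') ++ rest) v ntc h l =
            dfsBLoop graph start (ns' ++ rest) v ntc h l := by
          rw [dfsBLoop.eq_def]; simp [hmem]
        have hA : dfsAList graph (f + 1) (n :: ns') v ntc h l =
            dfsAList graph (f + 1) ns' v ntc h l := by
          rw [dfsAList, dfsACore]; simp [hmem]
        rw [hB, hA]
        exact ih rest v ntc h l hcc hh
      · have hv' : v.contains n = false := by simpa using hv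
        have hnmem : n ∉ v := by simpa using hv'
        by_cases hx : n.1 = start.1
        · -- same X: both sides do the identical updates
          cases hadj : pvLookupAdj graph n with
          | none =>
            have hB : dfsBLoop graph start ((n :: ns') ++ rest) v ntc h l =
                dfsBLoop graph start (ns' ++ rest) (PySem.Set.add v n)
                  (if n ≠ start then ntc ++ [n] else ntc)
                  (if n.2 > h.2 then n else h) (if n.2 < l.2 then n else l) := by
              rw [dfsBLoop.eq_def]
              simp [hnmem, hx]
              split
              · rfl
              · rename_i adj' heq
                rw [hadj] at heq
                cases heq
            have hA : dfsAList graph (f + 1) (n :: ns') v ntc h l =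
                dfsAList graph (f + 1) ns' (PySem.Set.add v n)
                  (if n ≠ start then ntc ++ [n] else ntc)
                  (if n.2 > h.2 then n else h) (if n.2 < l.2 then n else l) := by
              rw [dfsAList, dfsACore]; simp [hnmem, hget, hx, hadj]
            rw [hB, hA]
            refine ih rest _ _ _ _ (lt_of_le_of_lt (pvCC_add_le _ _ _) hcc) ?_
            split
            · cases ntc with
              | nil => exact absurd rfl hne
              | cons a b => simpa using hh
            · exact hh
          | some adj =>
            have hcclt : pvCC graph (PySem.Set.add v n) < f :=
              lt_of_lt_of_le (pvCC_add_lt graph v n adj hadj hv') (Nat.lt_succ_iff.mp hcc)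
            have hh' : (if n ≠ start then ntc ++ [n] else ntc).head? = some start := by
              split
              · cases ntc with
                | nil => exact absurd rfl hne
                | cons a b => simpa using hh
              · exact hh
            have hB : dfsBLoop graph start ((n :: ns') ++ rest) v ntc h l =
                dfsBLoop graph start (adj ++ (ns' ++ rest)) (PySem.Set.add v n)
                  (if n ≠ start then ntc ++ [n] else ntc)
                  (if n.2 > h.2 then n else h) (if n.2 < l.2 then n else l) := by
              rw [dfsBLoop.eq_def]
              simp [hnmem, hx]
              split
              · rename_i heq
                rw [hadj] at heq
                cases heq
              · rename_i adj' heq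
                rw [hadj] at heq
                injection heq with h2
                subst h2
                rfl
            have hcore : dfsACore graph (f + 1) n v ntc h l =
                dfsAList graph f adj (PySem.Set.add v n)
                  (if n ≠ start then ntc ++ [n] else ntc)
                  (if n.2 > h.2 then n else h) (if n.2 < l.2 then n else l) := by
              rw [dfsACore]; simp [hnmem, hget, hx, hadj]
            have hA : dfsAList graph (f + 1) (n :: ns') v ntc h l =
                dfsAList graph (f + 1) ns'
                  (dfsAList graph f adj (PySem.Set.add v n)
                    (if n ≠ start then ntc ++ [n] else ntc)
                    (if n.2 > h.2 then n else h) (if n.2 < l.2 then n else l)).2.1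
                  (dfsAList graph f adj (PySem.Set.add v n)
                    (if n ≠ start then ntc ++ [n] else ntc)
                    (if n.2 > h.2 then n else h) (if n.2 < l.2 then n else l)).2.2
                  (dfsAList graph f adj (PySem.Set.add v n)
                    (if n ≠ start then ntc ++ [n] else ntc)
                    (if n.2 > h.2 then n else h) (if n.2 < l.2 then n else l)).1.1
                  (dfsAList graph f adj (PySem.Set.add v n)
                    (if n ≠ start then ntc ++ [n] else ntc)
                    (if n.2 > h.2 then n else h) (if n.2 < l.2 then n else l)).1.2 := by
              rw [dfsAList, hcore]
            rw [hB, ihf graph start adj (ns' ++ rest) _ _ _ _ hcclt hh', hA]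
            refine ih rest _ _ _ _ ?_ ?_
            · exact lt_of_le_of_lt
                (le_trans (listA_cc graph f (fun a b c d e => coreA_cc f graph a b c d e) _ _ _ _ _)
                  (pvCC_add_le _ _ _)) hcc
            · rw [listA_ntc_head graph f (fun a b c d e => coreA_ntc_head f graph a b c d e)]
              exact hh'
        · -- different X: mark visited, nothing else
          have hB : dfsBLoop graph start ((n :: ns') ++ rest) v ntc h l =
              dfsBLoop graph start (ns' ++ rest) (PySem.Set.add v n) ntc h l := by
            rw [dfsBLoop.eq_def]; simp [hnmem, hx]
          have hA : dfsAList graph (f + 1) (n :: ns') v ntc h l =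
              dfsAList graph (f + 1) ns' (PySem.Set.add v n) ntc h l := by
            rw [dfsAList, dfsACore]; simp [hnmem, hget, hx]
          rw [hB, hA]
          exact ih rest _ ntc h l (lt_of_le_of_lt (pvCC_add_le _ _ _) hcc) hh

-- ===== VERDICT (by name: the statement is the Claim_ definition above) =====
theorem dfs_combine_nodes_py_spec : Claim_equal_dfs_combine_nodes_py := by
  intro graph node visited ntc h l _ _
  unfold Spec_dfs_combine_nodes_py dfs_combine_nodes_py dfs_combine_nodes_py_alt
  cases hget : PySem.List.pyGet? ntc 0 with
  | none =>
    have hnil : ntc = [] := by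
      cases ntc with
      | nil => rfl
      | cons a b => simp at hget
    subst hnil
    rw [dfsACore]
    split
    · rfl
    · simp [PySem.List.pyGet?]
  | some start =>
    have hh : ntc.head? = some start := by
      cases ntc with
      | nil => simp [PySem.List.pyGet?] at hget
      | cons a b => simpa using hget
    have hcc : pvCC graph visited < graph.length + 1 :=
      Nat.lt_succ_of_le List.countP_le_length
    have := keyB (graph.length + 1) graph start [node] [] visited ntc h l hcc hh
    simp only [List.append_nil] at this
    dsimp only
    rw [this]
    rw [dfsBLoop.eq_def]
    rw [show dfsAList graph (graph.length + 1) [node] visited ntc h l =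
        (((dfsACore graph (graph.length + 1) node visited ntc h l).1.1,
          (dfsACore graph (graph.length + 1) node visited ntc h l).1.2),
         (dfsACore graph (graph.length + 1) node visited ntc h l).2.1,
         (dfsACore graph (graph.length + 1) node visited ntc h l).2.2) from by
      rw [dfsAList, dfsAList]]
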